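-- pv_equiv track=rewrite | github.com/monk-time/algorithms | shbr2/e_deleting_numbers.py | min_to_delete
-- ===== SOURCE A (Python) =====
-- from collections import Counter
-- from itertools import pairwise
--
-- def min_to_delete(a: list[int]) -> int:
--     counter = Counter(a)
--     unique_nums = sorted(counter.keys())
--     if len(unique_nums) < 2:
--         return 0
--     max_len = 1
--     for x, y in pairwise(unique_nums):
--         if abs(x - y) <= 1:
--             max_len = max(counter[x] + counter[y], max_len)
--     return len(a) - max_len
-- ===== SOURCE B (Python) =====
-- def min_to_delete(a: list[int]) -> int:
--     # Sort the whole array and make one run-length pass: keep the current run's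
--     # value/length and the previous run's length when it is the adjacent value;
--     # the best kept block is the largest cur_run + adjacent prev_run.
--     best = 0
--     cur_val = None
--     prev_run = cur_run = 0
--     for v in sorted(a):
--         if cur_val == v:
--             cur_run += 1
--         else:
--             prev_run = cur_run if cur_val == v - 1 else 0
--             cur_val = v
--             cur_run = 1
--         if cur_run + prev_run > best:
--             best = cur_run + prev_run
--     return len(a) - best
-- ===== Notes on version B (the rewrite author's own statement) =====
-- stated objective: alternative
-- what changed: Replaces Counter + sorted unique keys + pairwise adjacent-key scan by sorting the whole array and making a single run-length pass that pairs each run with the adjacent previous run; B also fixes A's bug of ignoring single-value blocks (max_len starts at 1).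
-- intended difference: On lists with >=2 distinct values where some value's multiplicity exceeds 1 and every adjacent pair-sum, A returns len(a)-max(1, best adjacent pair) because its max_len starts at 1 and only scans pairs of distinct values, while B returns len(a)-(max multiplicity), the intended minimum number of deletions (e.g. [5,5,10]: A=2, B=1). — e.g. on min_to_delete([5, 5, 10]): A returns 2, B returns 1
import Mathlib
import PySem

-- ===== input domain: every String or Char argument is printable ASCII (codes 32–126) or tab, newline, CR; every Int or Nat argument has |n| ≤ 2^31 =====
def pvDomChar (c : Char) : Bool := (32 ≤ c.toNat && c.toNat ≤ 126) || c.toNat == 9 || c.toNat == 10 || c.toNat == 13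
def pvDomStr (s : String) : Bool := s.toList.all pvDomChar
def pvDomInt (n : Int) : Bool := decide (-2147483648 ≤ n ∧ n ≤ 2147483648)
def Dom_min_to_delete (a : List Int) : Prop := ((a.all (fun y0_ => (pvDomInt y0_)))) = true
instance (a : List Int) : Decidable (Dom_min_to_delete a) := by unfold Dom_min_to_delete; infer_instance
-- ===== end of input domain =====

-- B drops the Counter entirely: it sorts the whole array and makes one run-length pass,
-- pairing each run with the adjacent previous run (alternative algorithm, same O(n log n) cost).

-- ===== PORT A =====
def min_to_delete (a : List Int) : Int :=
  let counter := PySem.Dict.counter a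
  let unique_nums := PySem.List.sorted counter.keys (fun x => x) false
  if unique_nums.length < 2 then 0
  else
    let max_len := (unique_nums.zip unique_nums.tail).foldl
      (fun max_len p =>
        if |p.1 - p.2| ≤ 1 then max (counter.getD p.1 0 + counter.getD p.2 0) max_len
        else max_len) 1
    (a.length : Int) - max_len

-- ===== PORT B =====
def min_to_delete_alt (a : List Int) : Int :=
  let st := (PySem.List.sorted a (fun x => x) false).foldl
    (fun (st : Option Int × Int × Int × Int) v =>
      let s2 := if st.1 = some v then (st.1, st.2.1, st.2.2.1 + 1)
                else (some v, if st.1 = some (v - 1) then st.2.2.1 else 0, 1)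
      (s2.1, s2.2.1, s2.2.2,
        if s2.2.2 + s2.2.1 > st.2.2.2 then s2.2.2 + s2.2.1 else st.2.2.2))
    (none, 0, 0, 0)
  (a.length : Int) - st.2.2.2

-- ===== PRECONDITION & SPEC =====
-- On lists with ≥2 distinct values in which some value's multiplicity exceeds both 1 and every
-- adjacent pair-sum, A ignores the single-value block (its max_len starts at 1 and only pairs of
-- present adjacent values are scanned) and returns len(a) - max(1, best pair), while B returns
-- len(a) - (max multiplicity), the intended minimum number of deletions.
def D_min_to_delete (a : List Int) : Prop :=
  2 ≤ (PySem.Set.ofList a).length ∧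
    ∃ x ∈ a, 1 < a.count x ∧
      ∀ y ∈ a, (y + 1) ∈ a → a.count y + a.count (y + 1) < a.count x
instance (a : List Int) : Decidable (D_min_to_delete a) := by unfold D_min_to_delete; infer_instance

def Spec_min_to_delete (a : List Int) (out : Int) : Prop := ¬ D_min_to_delete a → out = min_to_delete_alt a
instance (a : List Int) (out : Int) : Decidable (Spec_min_to_delete a out) := by unfold Spec_min_to_delete; infer_instance

def pvDiffWitness_min_to_delete : List Int := [5, 5, 10]
def pvDiffWitnessOut_min_to_delete : Int × Int := (2, 1)

-- ===== CLAIM (what is proved, stated in full; the proofs are below) =====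
def Claim_unchanged_min_to_delete : Prop := ∀ (a : List Int), Dom_min_to_delete a → Spec_min_to_delete a (min_to_delete a)
def Claim_changed_min_to_delete : Prop := Dom_min_to_delete (pvDiffWitness_min_to_delete) ∧ D_min_to_delete (pvDiffWitness_min_to_delete) ∧ min_to_delete (pvDiffWitness_min_to_delete) = pvDiffWitnessOut_min_to_delete.1 ∧ min_to_delete_alt (pvDiffWitness_min_to_delete) = pvDiffWitnessOut_min_to_delete.2 ∧ pvDiffWitnessOut_min_to_delete.1 ≠ pvDiffWitnessOut_min_to_delete.2
def Claim_exact_min_to_delete : Prop := ∀ (a : List Int), Dom_min_to_delete a → D_min_to_delete a → min_to_delete a ≠ min_to_delete_alt a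

-- ===== LEMMAS AND PROOFS =====

-- Integer-valued multiplicity.
def pvCnt (p : List Int) (x : Int) : Int := (p.count x : Int)

-- Best kept block of a list p: max over v ∈ p of (count of v-1 in p) + (count of v in p).
def pvBest (p : List Int) : Int :=
  p.foldl (fun m v => max m (pvCnt p (v - 1) + pvCnt p v)) 0

-- One step of B's run-length scan (identical to the lambda in min_to_delete_alt).
def pvStep (st : Option Int × Int × Int × Int) (v : Int) : Option Int × Int × Int × Int :=
  let s2 := if st.1 = some v then (st.1, st.2.1, st.2.2.1 + 1)
            else (some v, if st.1 = some (v - 1) then st.2.2.1 else 0, 1)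
  (s2.1, s2.2.1, s2.2.2,
    if s2.2.2 + s2.2.1 > st.2.2.2 then s2.2.2 + s2.2.1 else st.2.2.2)

theorem pvIteMax (b x : Int) : (if x > b then x else b) = max b x := by
  rw [max_def]; split_ifs <;> omega

theorem pvCnt_append (p q : List Int) (x : Int) :
    pvCnt (p ++ q) x = pvCnt p x + pvCnt q x := by
  simp [pvCnt, List.count_append]

theorem pvCnt_nonneg (p : List Int) (x : Int) : 0 ≤ pvCnt p x := Int.natCast_nonneg _

theorem pvCnt_single (v x : Int) : pvCnt [v] x = if x = v then 1 else 0 := by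
  by_cases h : x = v
  · simp [pvCnt, h]
  · simp [pvCnt, h, List.count_eq_zero.mpr (show x ∉ [v] by simp [h])]

theorem pvCnt_pos_of_mem {p : List Int} {v : Int} (h : v ∈ p) : 1 ≤ pvCnt p v := by
  have := List.count_pos_iff.mpr h
  unfold pvCnt; exact_mod_cast this

theorem pvCnt_eq_zero_of_not_mem {p : List Int} {v : Int} (h : v ∉ p) : pvCnt p v = 0 := by
  simp [pvCnt, List.count_eq_zero_of_not_mem h]

theorem pvCnt_perm {p q : List Int} (h : p.Perm q) (x : Int) : pvCnt p x = pvCnt q x := by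
  simp [pvCnt, h.count_eq]

-- foldl-max order lemmas (unconditional step).
theorem pvFoldGeInit (f : Int → Int) :
    ∀ (l : List Int) (init : Int), init ≤ l.foldl (fun m v => max m (f v)) init := by
  intro l
  induction l with
  | nil => intro init; simp
  | cons x t ih =>
    intro init
    rw [List.foldl_cons]
    exact le_trans (le_max_left _ _) (ih _)

theorem pvFoldGeMem (f : Int → Int) :
    ∀ (l : List Int) (init v : Int), v ∈ l → f v ≤ l.foldl (fun m v => max m (f v)) init := by
  intro l
  induction l with
  | nil => intro _ v h; cases h
  | cons x t ih =>
    intro init v hv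
    rw [List.foldl_cons]
    rcases List.mem_cons.mp hv with h | h
    · subst h; exact le_trans (le_max_right _ _) (pvFoldGeInit f t _)
    · exact ih _ v h

theorem pvFoldLe (f : Int → Int) :
    ∀ (l : List Int) (init M : Int), init ≤ M → (∀ v ∈ l, f v ≤ M) →
      l.foldl (fun m v => max m (f v)) init ≤ M := by
  intro l
  induction l with
  | nil => intro _ _ h _; simpa using h
  | cons x t ih =>
    intro init M hi hm
    rw [List.foldl_cons]
    exact ih _ M (max_le hi (hm x (List.mem_cons_self))) (fun v hv => hm v (List.mem_cons_of_mem _ hv))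

-- foldl-max order lemmas (conditional step).
theorem pvCFoldGeInit (c : Int → Prop) [DecidablePred c] (f : Int → Int) :
    ∀ (l : List Int) (init : Int),
      init ≤ l.foldl (fun m k => if c k then max m (f k) else m) init := by
  intro l
  induction l with
  | nil => intro init; simp
  | cons x t ih =>
    intro init
    rw [List.foldl_cons]
    refine le_trans ?_ (ih _)
    split_ifs
    · exact le_max_left _ _
    · exact le_refl _

theorem pvCFoldGeMem (c : Int → Prop) [DecidablePred c] (f : Int → Int) :
    ∀ (l : List Int) (init v : Int), v ∈ l → c v →
      f v ≤ l.foldl (fun m k => if c k then max m (f k) else m) init := by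
  intro l
  induction l with
  | nil => intro _ v h; cases h
  | cons x t ih =>
    intro init v hv hc
    rw [List.foldl_cons]
    rcases List.mem_cons.mp hv with h | h
    · subst h
      rw [if_pos hc]
      exact le_trans (le_max_right _ _) (pvCFoldGeInit c f t _)
    · exact ih _ v h hc

theorem pvCFoldLe (c : Int → Prop) [DecidablePred c] (f : Int → Int) :
    ∀ (l : List Int) (init M : Int), init ≤ M → (∀ v ∈ l, c v → f v ≤ M) →
      l.foldl (fun m k => if c k then max m (f k) else m) init ≤ M := by
  intro l
  induction l with
  | nil => intro _ _ h _; simpa using h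
  | cons x t ih =>
    intro init M hi hm
    rw [List.foldl_cons]
    refine ih _ M ?_ (fun v hv hc => hm v (List.mem_cons_of_mem _ hv) hc)
    split_ifs with h
    · exact max_le hi (hm x (List.mem_cons_self) h)
    · exact hi

-- Appending a maximal element to p turns pvBest into max of pvBest p and the new block.
theorem pvBestAppend (p : List Int) (v : Int) (hv : ∀ u ∈ p, u ≤ v) :
    pvBest (p ++ [v]) = max (pvBest p) (pvCnt (p ++ [v]) (v - 1) + pvCnt (p ++ [v]) v) := by
  unfold pvBest
  apply le_antisymm
  · apply pvFoldLe
    · exact le_trans (pvFoldGeInit _ p 0) (le_max_left _ _)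
    · intro u hu
      by_cases huv : u = v
      · subst huv; exact le_max_right _ _
      · have hup : u ∈ p := by
          rcases List.mem_append.mp hu with h | h
          · exact h
          · exact absurd (List.mem_singleton.mp h) huv
        have h1 : pvCnt (p ++ [v]) (u - 1) = pvCnt p (u - 1) := by
          rw [pvCnt_append, pvCnt_single, if_neg (by have := hv u hup; omega)]; ring
        have h2 : pvCnt (p ++ [v]) u = pvCnt p u := by
          rw [pvCnt_append, pvCnt_single, if_neg huv]; ring
        rw [h1, h2]
        exact le_trans (pvFoldGeMem _ p 0 u hup) (le_max_left _ _)
  · apply max_le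
    · apply pvFoldLe
      · exact pvFoldGeInit _ (p ++ [v]) 0
      · intro u hu
        have hm : pvCnt p (u - 1) + pvCnt p u
            ≤ pvCnt (p ++ [v]) (u - 1) + pvCnt (p ++ [v]) u := by
          rw [pvCnt_append, pvCnt_append]
          have := pvCnt_nonneg [v] (u - 1)
          have := pvCnt_nonneg [v] u
          omega
        exact le_trans hm (pvFoldGeMem _ (p ++ [v]) 0 u (List.mem_append_left _ hu))
    · exact pvFoldGeMem _ (p ++ [v]) 0 v (List.mem_append_right _ (List.mem_singleton.mpr rfl))

-- One scan step from the canonical state of prefix p is the canonical state of p ++ [v].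
theorem pvStepState (p : List Int) (v w : Int) (hw : w ∈ p) (hmax : ∀ u ∈ p, u ≤ w)
    (hv : ∀ u ∈ p, u ≤ v) :
    pvStep (some w, pvCnt p (w - 1), pvCnt p w, pvBest p) v
      = (some v, pvCnt (p ++ [v]) (v - 1), pvCnt (p ++ [v]) v, pvBest (p ++ [v])) := by
  have hc1 : pvCnt (p ++ [v]) v = pvCnt p v + 1 := by
    rw [pvCnt_append, pvCnt_single, if_pos rfl]
  by_cases hwv : w = v
  · subst hwv
    have hne : pvCnt (p ++ [w]) (w - 1) = pvCnt p (w - 1) := by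
      rw [pvCnt_append, pvCnt_single, if_neg (by omega)]; ring
    have hred : pvStep (some w, pvCnt p (w - 1), pvCnt p w, pvBest p) w
        = (some w, pvCnt p (w - 1), pvCnt p w + 1,
           if pvCnt p w + 1 + pvCnt p (w - 1) > pvBest p then pvCnt p w + 1 + pvCnt p (w - 1)
           else pvBest p) := by
      simp only [pvStep, if_true]
    rw [hred, pvIteMax, pvBestAppend p w hv, hne, hc1]
    simp only [Prod.mk.injEq, true_and]
    congr 1
    ring
  · have hwlt : w < v := lt_of_le_of_ne (hv w hw) hwv
    have hvp : v ∉ p := fun h => absurd (hmax v h) (by omega)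
    have hcv : pvCnt p v = 0 := pvCnt_eq_zero_of_not_mem hvp
    have hprev : pvCnt (p ++ [v]) (v - 1) = (if (some w : Option Int) = some (v - 1) then pvCnt p w else 0) := by
      by_cases hw1 : w = v - 1
      · rw [if_pos (by rw [hw1]), pvCnt_append, pvCnt_single, if_neg (by omega), hw1]; ring
      · rw [if_neg (by simpa using hw1), pvCnt_append, pvCnt_single, if_neg (by omega)]
        have : (v - 1) ∉ p := fun h => absurd (hmax _ h) (by omega)
        rw [pvCnt_eq_zero_of_not_mem this]; ring
    have hred : pvStep (some w, pvCnt p (w - 1), pvCnt p w, pvBest p) v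
        = (some v, (if (some w : Option Int) = some (v - 1) then pvCnt p w else 0), 1,
           if 1 + (if (some w : Option Int) = some (v - 1) then pvCnt p w else 0) > pvBest p
           then 1 + (if (some w : Option Int) = some (v - 1) then pvCnt p w else 0) else pvBest p) := by
      simp only [pvStep]
      rw [if_neg (show ¬ ((some w : Option Int) = some v) by simpa using hwv)]
    have hc1' : pvCnt (p ++ [v]) v = 1 := by rw [hc1, hcv]; ring
    rw [hred, pvIteMax, pvBestAppend p v hv, hprev, hc1']
    simp only [Prod.mk.injEq, true_and]
    congr 1
    ring

-- B's scan invariant: folding pvStep from the canonical state of a nonempty prefix of a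
-- non-decreasing list ends with best = pvBest of the whole list.
theorem pvScanInv :
    ∀ (t p : List Int) (w : Int), (p ++ t).Pairwise (· ≤ ·) → w ∈ p → (∀ u ∈ p, u ≤ w) →
      (List.foldl pvStep (some w, pvCnt p (w - 1), pvCnt p w, pvBest p) t).2.2.2
        = pvBest (p ++ t) := by
  intro t
  induction t with
  | nil => intro p w _ _ _; simp
  | cons v t' ih =>
    intro p w hp hw hmax
    have hsplit := List.pairwise_append.mp hp
    have hv : ∀ u ∈ p, u ≤ v := fun u hu => hsplit.2.2 u hu v (List.mem_cons_self)
    rw [List.foldl_cons, pvStepState p v w hw hmax hv]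
    have hp' : ((p ++ [v]) ++ t').Pairwise (· ≤ ·) := by
      rw [List.append_assoc, List.singleton_append]; exact hp
    have := ih (p ++ [v]) v hp' (List.mem_append_right _ (List.mem_singleton.mpr rfl))
      (fun u hu => by
        rcases List.mem_append.mp hu with h | h
        · exact hv u h
        · rw [List.mem_singleton.mp h])
    rw [this, List.append_assoc, List.singleton_append]

-- B computes len(a) minus pvBest of the sorted array.
theorem pvAltChar (a : List Int) :
    min_to_delete_alt a
      = (a.length : Int) - pvBest (PySem.List.sorted a (fun x => x) false) := by
  have h0 : min_to_delete_alt a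
      = (a.length : Int)
        - ((PySem.List.sorted a (fun x => x) false).foldl pvStep (none, 0, 0, 0)).2.2.2 := rfl
  rw [h0]
  have hp : (PySem.List.sorted a (fun x => x) false).Pairwise (· ≤ ·) := by
    simpa using PySem.List.sorted_pairwise a (fun x => x)
  congr 1
  cases hs : PySem.List.sorted a (fun x => x) false with
  | nil => simp [pvBest]
  | cons v t =>
    rw [hs] at hp
    rw [List.foldl_cons]
    have h1 : pvStep (none, 0, 0, 0) v
        = (some v, pvCnt [v] (v - 1), pvCnt [v] v, pvBest [v]) := by
      have c1 : pvCnt [v] (v - 1) = 0 := by rw [pvCnt_single, if_neg (by omega)]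
      have c2 : pvCnt [v] v = 1 := by rw [pvCnt_single, if_pos rfl]
      have c3 : pvBest [v] = 1 := by
        unfold pvBest
        rw [List.foldl_cons, List.foldl_nil, c1, c2]
        norm_num
      simp [pvStep, c1, c2, c3]
    rw [h1]
    have := pvScanInv t [v] v (by simpa using hp) (List.mem_singleton.mpr rfl)
      (fun u hu => le_of_eq (List.mem_singleton.mp hu))
    rw [this, List.singleton_append]

-- On a strictly increasing list, A's adjacent-pair scan (keeping pairs that differ by ≤ 1)
-- computes the same running max as a per-key scan that pairs k with k+1 when k+1 is in the list.
theorem pvAdjFold (c : Int → Int) :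
    ∀ (u : List Int) (m : Int), u.Pairwise (· < ·) →
      (u.zip u.tail).foldl
        (fun m p => if |p.1 - p.2| ≤ 1 then max (c p.1 + c p.2) m else m) m
      = u.foldl (fun m k => if (k + 1) ∈ u then max m (c k + c (k + 1)) else m) m := by
  intro u
  induction u with
  | nil => intro m _; rfl
  | cons x t ih =>
    intro m hu
    cases t with
    | nil =>
      simp only [List.zip_nil_right, List.tail_cons, List.foldl_nil, List.foldl_cons,
        List.mem_singleton]
      rw [if_neg (by omega)]
    | cons y t' =>
      have hxy : x < y := (List.pairwise_cons.mp hu).1 y (by simp)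
      have hyt' : ∀ z ∈ t', y < z := fun z hz =>
        (List.pairwise_cons.mp (List.pairwise_cons.mp hu).2).1 z hz
      have hmem : (x + 1) ∈ (x :: y :: t') ↔ y = x + 1 := by
        constructor
        · intro h
          rcases List.mem_cons.mp h with h | h
          · omega
          rcases List.mem_cons.mp h with h | h
          · omega
          · exact absurd (hyt' _ h) (by omega)
        · intro h; simp [h]
      have hcongr :
          List.foldl (fun m k => if (k + 1) ∈ (x :: y :: t') then max m (c k + c (k + 1)) else m)
            (if (x + 1) ∈ (x :: y :: t') then max m (c x + c (x + 1)) else m) (y :: t')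
          = List.foldl (fun m k => if (k + 1) ∈ (y :: t') then max m (c k + c (k + 1)) else m)
            (if (x + 1) ∈ (x :: y :: t') then max m (c x + c (x + 1)) else m) (y :: t') := by
        apply PySem.List.foldl_congr_mem
        intro acc k hk
        have hkx : x < k := (List.pairwise_cons.mp hu).1 k hk
        have : ((k + 1) ∈ (x :: y :: t')) ↔ ((k + 1) ∈ (y :: t')) := by
          have hne : ¬ (k + 1 = x) := by omega
          simp [List.mem_cons, hne]
        rw [if_congr this rfl rfl]
      have habs : (|x - y| ≤ 1) ↔ y = x + 1 := by
        rw [abs_sub_comm, abs_of_pos (by omega)]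
        omega
      calc
        (List.zip (x :: y :: t') (y :: t')).foldl
            (fun m p => if |p.1 - p.2| ≤ 1 then max (c p.1 + c p.2) m else m) m
          = (List.zip (y :: t') t').foldl
              (fun m p => if |p.1 - p.2| ≤ 1 then max (c p.1 + c p.2) m else m)
              (if |x - y| ≤ 1 then max (c x + c y) m else m) := by
              simp [List.zip_cons_cons]
        _ = (y :: t').foldl (fun m k => if (k + 1) ∈ (y :: t') then max m (c k + c (k + 1)) else m)
              (if |x - y| ≤ 1 then max (c x + c y) m else m) := by
              exact ih _ (List.pairwise_cons.mp hu).2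
        _ = (y :: t').foldl (fun m k => if (k + 1) ∈ (y :: t') then max m (c k + c (k + 1)) else m)
              (if (x + 1) ∈ (x :: y :: t') then max m (c x + c (x + 1)) else m) := by
              congr 1
              rw [if_congr habs rfl rfl, if_congr hmem rfl rfl]
              by_cases h : y = x + 1
              · rw [if_pos h, if_pos h, h, max_comm]
              · rw [if_neg h, if_neg h]
        _ = (x :: y :: t').foldl
              (fun m k => if (k + 1) ∈ (x :: y :: t') then max m (c k + c (k + 1)) else m) m := by
              conv_rhs => rw [List.foldl_cons]
              rw [hcongr]

-- A's value when there are at least two distinct values.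
theorem pvAChar (a : List Int) (h2 : ¬ (PySem.Set.ofList a).length < 2) :
    min_to_delete a
      = (a.length : Int)
        - (PySem.List.sorted (PySem.Set.ofList a) (fun x => x) false).foldl
            (fun m k => if (k + 1) ∈ a then max m (pvCnt a k + pvCnt a (k + 1)) else m) 1 := by
  unfold min_to_delete
  simp only [PySem.Dict.keys_counter, PySem.Dict.getD_counter]
  have hlen : (PySem.List.sorted (PySem.Set.ofList a) (fun x => x) false).length
      = (PySem.Set.ofList a).length :=
    (PySem.List.sorted_perm (PySem.Set.ofList a) (fun x => x) false).length_eq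
  rw [hlen, if_neg h2]
  congr 1
  rw [pvAdjFold (fun k => (a.count k : Int)) _ 1 (PySem.List.sorted_ofList_pairwise_lt a)]
  apply PySem.List.foldl_congr_mem
  intro acc k _
  rw [if_congr (by rw [PySem.List.mem_sorted, PySem.Set.mem_ofList]) rfl rfl]
  rfl

-- A's value when there are fewer than two distinct values.
theorem pvA0 (a : List Int) (h2 : (PySem.Set.ofList a).length < 2) : min_to_delete a = 0 := by
  unfold min_to_delete
  simp only [PySem.Dict.keys_counter]
  have hlen : (PySem.List.sorted (PySem.Set.ofList a) (fun x => x) false).length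
      = (PySem.Set.ofList a).length :=
    (PySem.List.sorted_perm (PySem.Set.ofList a) (fun x => x) false).length_eq
  rw [hlen, if_pos h2]

-- Two distinct members force at least two distinct values.
theorem pvTwoDistinct {a : List Int} {x v : Int} (hx : x ∈ a) (hv : v ∈ a) (hne : x ≠ v) :
    2 ≤ (PySem.Set.ofList a).length := by
  have hsub : [x, v] ⊆ PySem.Set.ofList a := by
    intro z hz
    rcases List.mem_cons.mp hz with h | h
    · rw [h]; exact (PySem.Set.mem_ofList a x).mpr hx
    · rw [List.mem_singleton.mp h]; exact (PySem.Set.mem_ofList a v).mpr hv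
  have hnd : ([x, v] : List Int).Nodup := by simp [hne]
  simpa using (hnd.subperm hsub).length_le

-- Main agreement lemma outside D_.
theorem pvMain (a : List Int) (hnd : ¬ D_min_to_delete a) :
    min_to_delete a = min_to_delete_alt a := by
  rw [pvAltChar]
  have hperm := PySem.List.sorted_perm a (fun x => x) false
  have hcS : ∀ y, pvCnt (PySem.List.sorted a (fun x => x) false) y = pvCnt a y :=
    fun y => pvCnt_perm hperm y
  by_cases h2 : (PySem.Set.ofList a).length < 2
  · rw [pvA0 a h2]
    cases a with
    | nil =>
      have : PySem.List.sorted ([] : List Int) (fun x => x) false = [] := by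
        rw [PySem.List.sorted_eq_nil_iff]
      rw [this]
      simp [pvBest]
    | cons x t =>
      have hone : ∀ v ∈ x :: t, v = x := by
        intro v hv
        by_contra hne
        exact absurd (pvTwoDistinct (List.mem_cons_self) hv (fun h => hne h.symm)) (by omega)
      have hn : pvCnt (x :: t) x = ((x :: t).length : Int) := by
        unfold pvCnt
        congr 1
        rw [List.count_eq_length]
        intro b hb
        exact (hone b hb).symm
      have hz : pvCnt (x :: t) (x - 1) = 0 := by
        apply pvCnt_eq_zero_of_not_mem
        intro h
        have := hone _ h
        omega
      have hmemS : ∀ v, v ∈ PySem.List.sorted (x :: t) (fun x => x) false ↔ v ∈ x :: t :=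
        fun v => PySem.List.mem_sorted _ _ _ v
      have hbest : pvBest (PySem.List.sorted (x :: t) (fun x => x) false)
          = ((x :: t).length : Int) := by
        unfold pvBest
        apply le_antisymm
        · apply pvFoldLe
          · positivity
          · intro v hv
            have hva := (hmemS v).mp hv
            have := hone v hva
            subst this
            rw [hcS, hcS, hn, hz]
            omega
        · have hxS : x ∈ PySem.List.sorted (x :: t) (fun x => x) false :=
            (hmemS x).mpr List.mem_cons_self
          refine le_trans ?_ (pvFoldGeMem _ _ 0 x hxS)
          rw [hcS, hcS, hn, hz]
          omega
      rw [hbest]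
      omega
  · rw [pvAChar a h2]
    congr 1
    -- names
    have hmemu : ∀ k, k ∈ PySem.List.sorted (PySem.Set.ofList a) (fun x => x) false ↔ k ∈ a := by
      intro k; rw [PySem.List.mem_sorted, PySem.Set.mem_ofList]
    have hmemS : ∀ k, k ∈ PySem.List.sorted a (fun x => x) false ↔ k ∈ a :=
      fun k => PySem.List.mem_sorted _ _ _ k
    -- a is nonempty
    have hz : ∃ z, z ∈ a := by
      cases hu : PySem.Set.ofList a with
      | nil => rw [hu] at h2; simp at h2
      | cons z t =>
        refine ⟨z, ?_⟩
        rw [← PySem.Set.mem_ofList, hu]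
        exact List.mem_cons_self
    obtain ⟨z, hza⟩ := hz
    have hBest1 : 1 ≤ pvBest (PySem.List.sorted a (fun x => x) false) := by
      unfold pvBest
      refine le_trans ?_ (pvFoldGeMem _ _ 0 z ((hmemS z).mpr hza))
      rw [hcS, hcS]
      have h1 := pvCnt_pos_of_mem hza
      have h0 := pvCnt_nonneg a (z - 1)
      omega
    apply le_antisymm
    · -- A's fold ≤ pvBest S
      apply pvCFoldLe
      · exact hBest1
      · intro k hk hk1
        have hkS : (k + 1) ∈ PySem.List.sorted a (fun x => x) false := (hmemS _).mpr hk1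
        refine le_trans ?_ (pvFoldGeMem _ _ 0 (k + 1) hkS)
        rw [hcS, hcS]
        have : k + 1 - 1 = k := by omega
        rw [this]
    · -- pvBest S ≤ A's fold
      apply pvFoldLe
      · exact le_trans (by norm_num) (pvCFoldGeInit _ _ _ 1)
      · intro v hv
        have hva := (hmemS v).mp hv
        rw [hcS, hcS]
        by_cases hv1 : (v - 1) ∈ a
        · have hcond : (v - 1) + 1 ∈ a := by
            have : v - 1 + 1 = v := by omega
            rw [this]; exact hva
          have := pvCFoldGeMem (fun k => (k + 1) ∈ a) (fun k => pvCnt a k + pvCnt a (k + 1))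
            (PySem.List.sorted (PySem.Set.ofList a) (fun x => x) false) 1 (v - 1)
            ((hmemu _).mpr hv1) hcond
          dsimp only at this
          have heq : v - 1 + 1 = v := by omega
          rw [heq] at this
          exact this
        · rw [pvCnt_eq_zero_of_not_mem hv1]
          -- need pvCnt a v ≤ fold
          unfold D_min_to_delete at hnd
          push Not at hnd
          have hforall := hnd (by omega)
          by_cases hcv : 1 < a.count v
          · obtain ⟨y, hy, hy1, hge⟩ := hforall v hva hcv
            have hfold := pvCFoldGeMem (fun k => (k + 1) ∈ a)
              (fun k => pvCnt a k + pvCnt a (k + 1))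
              (PySem.List.sorted (PySem.Set.ofList a) (fun x => x) false) 1 y
              ((hmemu _).mpr hy) hy1
            have hcast : pvCnt a v ≤ pvCnt a y + pvCnt a (y + 1) := by
              unfold pvCnt; exact_mod_cast hge
            dsimp only at hfold
            linarith
          · have : pvCnt a v ≤ 1 := by unfold pvCnt; exact_mod_cast Nat.not_lt.mp hcv
            have hinit := pvCFoldGeInit (fun k => (k + 1) ∈ a)
              (fun k => pvCnt a k + pvCnt a (k + 1))
              (PySem.List.sorted (PySem.Set.ofList a) (fun x => x) false) 1
            linarith

-- Inside D_ the two programs always disagree.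
theorem pvTightLemma (a : List Int) (hd : D_min_to_delete a) :
    min_to_delete a ≠ min_to_delete_alt a := by
  obtain ⟨h2, x, hx, hcx, hall⟩ := hd
  have h2' : ¬ (PySem.Set.ofList a).length < 2 := by omega
  rw [pvAChar a h2', pvAltChar]
  have hcS : ∀ y, pvCnt (PySem.List.sorted a (fun x => x) false) y = pvCnt a y :=
    fun y => pvCnt_perm (PySem.List.sorted_perm a (fun x => x) false) y
  have hmemu : ∀ k, k ∈ PySem.List.sorted (PySem.Set.ofList a) (fun x => x) false ↔ k ∈ a := by
    intro k; rw [PySem.List.mem_sorted, PySem.Set.mem_ofList]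
  have hU : (PySem.List.sorted (PySem.Set.ofList a) (fun x => x) false).foldl
      (fun m k => if (k + 1) ∈ a then max m (pvCnt a k + pvCnt a (k + 1)) else m) 1
      ≤ pvCnt a x - 1 := by
    apply pvCFoldLe
    · have : (1 : Int) < pvCnt a x := by unfold pvCnt; exact_mod_cast hcx
      omega
    · intro y hy hy1
      have := hall y ((hmemu y).mp hy) hy1
      have hc : pvCnt a y + pvCnt a (y + 1) < pvCnt a x := by
        unfold pvCnt; exact_mod_cast this
      omega
  have hB : pvCnt a x ≤ pvBest (PySem.List.sorted a (fun x => x) false) := by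
    unfold pvBest
    refine le_trans ?_ (pvFoldGeMem _ _ 0 x (( PySem.List.mem_sorted _ _ _ x).mpr hx))
    rw [hcS, hcS]
    have := pvCnt_nonneg a (x - 1)
    omega
  intro h
  omega

-- ===== VERDICT (by name: the statements are the Claim_ definitions above) =====
theorem min_to_delete_spec : Claim_unchanged_min_to_delete := by
  intro a _ hnd
  exact pvMain a hnd

theorem min_to_delete_changed : Claim_changed_min_to_delete := by
  unfold Claim_changed_min_to_delete; decide

theorem min_to_delete_tight : Claim_exact_min_to_delete := by
  intro a _ hd
  exact pvTightLemma a hd
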